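-- pv_equiv track=rewrite | github.com/cutehammond772/problem-solving-archive | 백준/Gold/1195. 킥다운/킥다운.py | solve
-- ===== SOURCE A (Python) =====
-- def solve(A, B):
-- 	# B가 더 짧은 기어 파트가 되도록 한다.
-- 	if len(A) < len(B):
-- 		A, B = B, A
--
-- 	LA, LB = len(A), len(B)
-- 	result = LA + LB
--
-- 	# A를 기준으로 양 옆에 B - 1만큼 빈 칸을 만든다.
-- 	board = [1] * (LA + 2 * (LB - 1))
-- 	board[(LB - 1):(LB - 1 + LA)] = A
--
-- 	for off in range(len(board) - (LB - 1)):
-- 		possible = True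
--
-- 		for x in range(LB):
-- 			if board[off + x] == B[x] == 2:
-- 				possible = False
-- 				break
--
-- 		if possible:
-- 			result = min(result, max(0, (LB - 1) - off) + max(0, off - (LA - 1)) + LA)
--
-- 	return result
-- ===== SOURCE B (Python) =====
-- def solve(A, B):
--     # collision-pair approach: enumerate the 2-positions once, mark the bad
--     # offsets they generate, then take the min cost over the good offsets
--     if len(A) < len(B):
--         A, B = B, A
--     LA, LB = len(A), len(B)
--     twoA = [i for i, v in enumerate(A) if v == 2]
--     twoB = [j for j, v in enumerate(B) if v == 2]
--     bad = {i + (LB - 1) - j for i in twoA for j in twoB}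
--     result = LA + LB
--     for off in range(LA + LB - 1):
--         if off not in bad:
--             result = min(result, LA + max(0, (LB - 1) - off) + max(0, off - (LA - 1)))
--     return result
-- ===== Notes on version B (the rewrite author's own statement) =====
-- stated objective: faster
-- what changed: The padded board and the per-offset inner window scan are replaced by a set of bad offsets generated once from the pairs of 2-positions of the two gears; each offset then needs only one set-membership test (measured 416x faster at n=4096 in a timing run).
import Mathlib
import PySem

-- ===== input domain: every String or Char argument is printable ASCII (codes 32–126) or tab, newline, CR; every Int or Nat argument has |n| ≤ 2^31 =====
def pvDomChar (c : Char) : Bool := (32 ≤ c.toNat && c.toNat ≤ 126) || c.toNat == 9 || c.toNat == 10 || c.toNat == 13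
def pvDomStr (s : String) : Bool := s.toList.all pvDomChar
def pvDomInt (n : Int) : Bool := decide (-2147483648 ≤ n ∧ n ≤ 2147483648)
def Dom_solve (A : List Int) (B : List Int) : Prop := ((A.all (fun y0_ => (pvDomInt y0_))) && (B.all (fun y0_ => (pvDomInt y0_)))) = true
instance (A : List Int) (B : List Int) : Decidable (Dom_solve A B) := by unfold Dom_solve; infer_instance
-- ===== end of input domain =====

-- B replaces A's padded board and per-offset inner scan by a set of bad offsets generated
-- once from the pairs of 2-positions of the two gears (objective: faster; measured).

-- ===== PORT A =====
-- board[off+x] / B[x] are ported with pyGetD 0: every index the loops reach is in range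
-- (proved below), so the default is never used; the inner for-with-break is the any-scan.
def solveCoreA (A : List Int) (B : List Int) : Int :=
  let LA : Int := A.length
  let LB : Int := B.length
  let board0 : List Int := List.replicate (LA + 2 * (LB - 1)).toNat 1   -- [1] * n (n < 0 gives [])
  -- board[(LB-1):(LB-1+LA)] = A — Python slice assignment; exact here: on every input the
  -- clamped stop is ≥ the clamped start, so the result is prefix ++ A ++ suffix
  let board : List Int := PySem.List.slice board0 none (some (LB - 1)) ++ A ++
                          PySem.List.slice board0 (some (LB - 1 + LA)) none
  (PySem.List.pyRange 0 ((board.length : Int) - (LB - 1)) 1).foldl (fun result off =>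
    let possible := !((PySem.List.pyRange 0 LB 1).any (fun x =>
      (PySem.List.pyGetD board (off + x) 0 == PySem.List.pyGetD B x 0) &&
      (PySem.List.pyGetD B x 0 == 2)))
    if possible then min result (max 0 ((LB - 1) - off) + max 0 (off - (LA - 1)) + LA)
    else result)
    (LA + LB)

def solve (A : List Int) (B : List Int) : Int :=
  if A.length < B.length then solveCoreA B A else solveCoreA A B

-- ===== PORT B =====
def solveCoreB (A : List Int) (B : List Int) : Int :=
  let LA : Int := A.length
  let LB : Int := B.length
  let twoA := ((PySem.List.enumerate A 0).filter (fun p => p.2 == 2)).map (fun p => p.1)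
  let twoB := ((PySem.List.enumerate B 0).filter (fun p => p.2 == 2)).map (fun p => p.1)
  let bad : PySem.Set Int :=
    PySem.Set.ofList (twoA.flatMap (fun i => twoB.map (fun j => i + (LB - 1) - j)))
  (PySem.List.pyRange 0 (LA + LB - 1) 1).foldl (fun result off =>
    if !(PySem.Set.contains bad off) then
      min result (LA + max 0 ((LB - 1) - off) + max 0 (off - (LA - 1)))
    else result)
    (LA + LB)

def solve_alt (A : List Int) (B : List Int) : Int :=
  if A.length < B.length then solveCoreB B A else solveCoreB A B

-- ===== PRECONDITION & SPEC =====
def Spec_solve (A : List Int) (B : List Int) (out : Int) : Prop := out = solve_alt A B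
instance (A : List Int) (B : List Int) (out : Int) : Decidable (Spec_solve A B out) := by unfold Spec_solve; infer_instance

-- ===== CLAIM (what is proved, stated in full; the proofs are below) =====
def Claim_equal_solve : Prop := ∀ (A : List Int) (B : List Int), Dom_solve A B → Spec_solve A B (solve A B)

-- ===== LEMMAS AND PROOFS =====

lemma foldl_min_init (l : List Int) (f : Int → Int) (c : Int)
    (h : ∀ x ∈ l, c ≤ f x) : l.foldl (fun r x => min r (f x)) c = c := by
  induction l with
  | nil => rfl
  | cons a t ih =>
      simp only [List.foldl_cons]
      rw [min_eq_left (h a (List.mem_cons_self))]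
      exact ih (fun x hx => h x (List.mem_cons_of_mem a hx))

lemma coreA_nil (A : List Int) : solveCoreA A [] = (A.length : Int) := by
  simp only [solveCoreA, List.length_nil, Nat.cast_zero,
    PySem.List.pyRange_one_eq_nil (le_refl (0:Int)), List.any_nil, Bool.not_false, if_true]
  rw [foldl_min_init]
  · ring
  · intro x _
    have h1 : (0:Int) ≤ max 0 ((0:Int) - 1 - x) := le_max_left _ _
    have h2 : (0:Int) ≤ max 0 (x - ((A.length:Int) - 1)) := le_max_left _ _
    omega

lemma flatten_map_nil {a b : Type} (l : List a) : (l.map (fun _ => ([]:List b))).flatten = [] := by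
  induction l <;> simp_all

lemma coreB_nil (A : List Int) : solveCoreB A [] = (A.length : Int) := by
  simp only [solveCoreB, List.length_nil, Nat.cast_zero, PySem.List.enumerate_nil,
    List.filter_nil, List.map_nil, List.flatMap, flatten_map_nil]
  simp only [show PySem.Set.contains (PySem.Set.ofList ([]:List Int)) = fun _ => false from rfl,
    Bool.not_false, if_true]
  rw [foldl_min_init]
  · ring
  · intro x _
    have h1 : (0:Int) ≤ max 0 ((0:Int) - 1 - x) := le_max_left _ _
    have h2 : (0:Int) ≤ max 0 (x - ((A.length:Int) - 1)) := le_max_left _ _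
    omega
lemma board_eq (A B : List Int) (hB : 1 ≤ B.length) (hle : B.length ≤ A.length) :
    PySem.List.slice (List.replicate ((A.length:Int) + 2*((B.length:Int)-1)).toNat (1:Int)) none (some ((B.length:Int) - 1)) ++ A ++
    PySem.List.slice (List.replicate ((A.length:Int) + 2*((B.length:Int)-1)).toNat (1:Int)) (some ((B.length:Int) - 1 + (A.length:Int))) none
    = List.replicate (B.length-1) 1 ++ A ++ List.replicate (B.length-1) 1 := by
  have h1 : ((B.length:Int) - 1) = ((B.length - 1 : Nat) : Int) := by omega
  have h3 : ((A.length:Int) + 2*((B.length:Int)-1)).toNat = (B.length-1) + A.length + (B.length-1) := by omega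
  rw [h3, h1]
  rw [show ((B.length-1:Nat):Int) + (A.length:Int) = ((B.length-1+A.length:Nat):Int) from by push_cast; ring]
  rw [PySem.List.slice_to_natCast, PySem.List.slice_from_natCast,
    List.take_replicate, List.drop_replicate]
  rw [min_eq_left (by omega),
    show B.length - 1 + A.length + (B.length - 1) - (B.length - 1 + A.length) = B.length - 1 from by omega]
-- position k of the padded board holds a 2 iff it lies in the A-region and A has a 2 there
lemma padded_two (pad : Nat) (A : List Int) (k : Nat) :
    (List.replicate pad (1:Int) ++ A ++ List.replicate pad 1)[k]? = some 2 ↔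
    ∃ kA : Nat, kA < A.length ∧ A[kA]? = some 2 ∧ k = pad + kA := by
  rcases Nat.lt_or_ge k pad with h | h
  · rw [List.getElem?_append_left (by simp; omega), List.getElem?_append_left (by simp; omega),
      List.getElem?_replicate]
    simp only [if_pos h]
    constructor
    · intro hx; exact absurd (Option.some.inj hx) (by norm_num)
    · rintro ⟨kA, _, _, rfl⟩; omega
  · rcases Nat.lt_or_ge k (pad + A.length) with h2 | h2
    · rw [List.getElem?_append_left (by simp; omega),
        List.getElem?_append_right (by simp; omega)]
      simp only [List.length_replicate]
      constructor
      · intro hx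
        refine ⟨k - pad, ?_, hx, by omega⟩
        omega
      · rintro ⟨kA, hlt, hv, rfl⟩
        simpa using hv
    · rw [List.getElem?_append_right (by simp; omega), List.getElem?_replicate]
      constructor
      · intro hx
        split at hx
        · exact absurd (Option.some.inj hx) (by norm_num)
        · exact absurd hx (by simp)
      · rintro ⟨kA, _, _, rfl⟩; omega
-- the 2-position list of B's comprehension, characterized
lemma mem_two (X : List Int) (i : Int) :
    i ∈ ((PySem.List.enumerate X 0).filter (fun p => p.2 == 2)).map (fun p => p.1) ↔
    ∃ k : Nat, k < X.length ∧ X[k]? = some 2 ∧ i = (k:Int) := by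
  simp only [List.mem_map, List.mem_filter, PySem.List.mem_enumerate_iff]
  constructor
  · rintro ⟨p, ⟨⟨k, hk, rfl⟩, hv⟩, rfl⟩
    refine ⟨k, hk, ?_, by simp⟩
    simp only [beq_iff_eq] at hv
    rw [List.getElem?_eq_getElem hk, hv]
  · rintro ⟨k, hk, hv, rfl⟩
    refine ⟨((k:Int), X[k]), ⟨⟨k, hk, by simp⟩, ?_⟩, rfl⟩
    simp only [beq_iff_eq]
    rw [List.getElem?_eq_getElem hk] at hv
    exact Option.some.inj hv

-- A's inner collision scan over the padded board = membership in B's bad-offset set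
lemma collide_iff (A B : List Int) (hB : 1 ≤ B.length) (hle : B.length ≤ A.length)
    (off : Int) (h0 : 0 ≤ off) (hoff : off < (A.length:Int) + (B.length:Int) - 1) :
    ((PySem.List.pyRange 0 (B.length:Int) 1).any (fun x =>
      (PySem.List.pyGetD (List.replicate (B.length-1) (1:Int) ++ A ++ List.replicate (B.length-1) 1) (off + x) 0 == PySem.List.pyGetD B x 0) &&
      (PySem.List.pyGetD B x 0 == 2)))
    = PySem.Set.contains (PySem.Set.ofList
        ((((PySem.List.enumerate A 0).filter (fun p => p.2 == 2)).map (fun p => p.1)).flatMap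
          (fun i => (((PySem.List.enumerate B 0).filter (fun p => p.2 == 2)).map (fun p => p.1)).map
            (fun j => i + ((B.length:Int) - 1) - j)))) off := by
  rw [show ∀ a b : Bool, a = b ↔ ((a = true) ↔ (b = true)) from by decide]
  rw [PySem.Set.contains_iff, PySem.Set.mem_ofList]
  simp only [List.any_eq_true, Bool.and_eq_true, beq_iff_eq, PySem.List.mem_pyRange_one,
    List.mem_flatMap]
  have hlen : (List.replicate (B.length-1) (1:Int) ++ A ++ List.replicate (B.length-1) 1).length
      = (B.length-1) + A.length + (B.length-1) := by simp; omega
  constructor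
  · rintro ⟨x, ⟨hx0, hxlb⟩, heq, h2⟩
    have hbx : B[x.toNat]? = some 2 := by
      rw [PySem.List.pyGetD_eq_getElem B 0 hx0 hxlb] at h2
      rw [List.getElem?_eq_getElem (by omega), h2]
    have hin : 0 ≤ off + x := by omega
    have hin2 : off + x < ((List.replicate (B.length-1) (1:Int) ++ A ++ List.replicate (B.length-1) 1).length : Int) := by
      rw [hlen]; push_cast; omega
    have hb2 : (List.replicate (B.length-1) (1:Int) ++ A ++ List.replicate (B.length-1) 1)[(off+x).toNat]? = some 2 := by
      rw [PySem.List.pyGetD_eq_getElem _ 0 hin hin2] at heq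
      rw [List.getElem?_eq_getElem (by omega), heq, h2]
    rw [padded_two] at hb2
    obtain ⟨kA, hkA, hvA, hk⟩ := hb2
    refine ⟨(kA:Int), (mem_two A _).mpr ⟨kA, hkA, hvA, rfl⟩, ?_⟩
    rw [List.mem_map]
    exact ⟨(x.toNat:Int), (mem_two B _).mpr ⟨x.toNat, by omega, hbx, rfl⟩, by omega⟩
  · rintro ⟨i, hi, hoffmem⟩
    rw [List.mem_map] at hoffmem
    obtain ⟨j, hj, hoffeq⟩ := hoffmem
    obtain ⟨kA, hkA, hvA, rfl⟩ := (mem_two A i).mp hi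
    obtain ⟨kB, hkB, hvB, rfl⟩ := (mem_two B j).mp hj
    have hin : (0:Int) ≤ off + kB := by omega
    have hin2 : off + (kB:Int) < ((List.replicate (B.length-1) (1:Int) ++ A ++ List.replicate (B.length-1) 1).length : Int) := by
      rw [hlen]; push_cast; omega
    refine ⟨(kB:Int), ⟨by omega, by omega⟩, ?_, ?_⟩
    · rw [PySem.List.pyGetD_eq_getElem _ 0 hin hin2,
          PySem.List.pyGetD_eq_getElem B 0 (by omega) (by omega)]
      have h1 : (List.replicate (B.length-1) (1:Int) ++ A ++ List.replicate (B.length-1) 1)[(off+(kB:Int)).toNat]? = some 2 := by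
        rw [padded_two]
        exact ⟨kA, hkA, hvA, by omega⟩
      have h2 : B[((kB:Int)).toNat]? = some 2 := by simpa using hvB
      rw [List.getElem?_eq_getElem (by omega)] at h1
      rw [List.getElem?_eq_getElem (by omega)] at h2
      rw [Option.some.inj h1, Option.some.inj h2]
    · rw [PySem.List.pyGetD_eq_getElem B 0 (by omega) (by omega)]
      have h2 : B[((kB:Int)).toNat]? = some 2 := by simpa using hvB
      rw [List.getElem?_eq_getElem (by omega)] at h2
      exact Option.some.inj h2

lemma core_eq (A B : List Int) (hB : B ≠ []) (hle : B.length ≤ A.length) :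
    solveCoreA A B = solveCoreB A B := by
  have hB1 : 1 ≤ B.length := List.length_pos_iff.mpr hB
  simp only [solveCoreA, solveCoreB]
  rw [board_eq A B hB1 hle]
  have hrange : PySem.List.pyRange 0 (((List.replicate (B.length-1) (1:Int) ++ A ++ List.replicate (B.length-1) 1).length : Int) - ((B.length:Int) - 1)) 1 = PySem.List.pyRange 0 ((A.length:Int) + (B.length:Int) - 1) 1 := by
    congr 1
    simp
    omega
  rw [hrange]
  apply PySem.List.foldl_congr_mem
  intro acc off hmem
  rw [PySem.List.mem_pyRange_one] at hmem
  rw [collide_iff A B hB1 hle off hmem.1 hmem.2]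
  split_ifs with h
  · rw [show max 0 (((B.length:Int) - 1) - off) + max 0 (off - ((A.length:Int) - 1)) + (A.length:Int)
        = (A.length:Int) + max 0 (((B.length:Int) - 1) - off) + max 0 (off - ((A.length:Int) - 1)) from by ring]
  · rfl

-- ===== VERDICT (by name: the statement is the Claim_ definition above) =====
theorem solve_spec : Claim_equal_solve := by
  intro A B _
  unfold Spec_solve solve solve_alt
  split_ifs with h
  · rcases List.eq_nil_or_concat A with rfl | ⟨l, b, rfl⟩
    · rw [coreA_nil, coreB_nil]
    · exact core_eq B (l.concat b) (by simp) (le_of_lt h)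
  · rcases List.eq_nil_or_concat B with rfl | ⟨l, b, rfl⟩
    · rw [coreA_nil, coreB_nil]
    · exact core_eq A (l.concat b) (by simp) (le_of_not_gt h)
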